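-- pv_equiv track=rewrite | github.com/aditandadit/GenomeAssembly | optimal_k.py | is_optimal
-- ===== SOURCE A (Python) =====
-- def is_optimal(k, reads):
--     kmers = set()
--     for read in reads:
--         for i in range(0, len(read) - k + 1):
--             kmers.add(read[i:i + k])
--     prefixes = set()
--     suffixes = set()
--     for kmer in kmers:
--         prefixes.add(kmer[:-1])
--         suffixes.add(kmer[1:])
--     return prefixes == suffixes
-- ===== SOURCE B (Python) =====
-- def is_optimal(k, reads):
--     roles = {}
--     for read in reads:
--         for i in range(0, len(read) - k + 1):
--             kmer = read[i:i + k]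
--             roles[kmer[:-1]] = roles.get(kmer[:-1], 0) | 1
--             roles[kmer[1:]] = roles.get(kmer[1:], 0) | 2
--     return all(v == 3 for v in roles.values())
-- ===== Notes on version B (the rewrite author's own statement) =====
-- stated objective: alternative
-- what changed: Replaces A's build-kmer-set-then-two-sets-and-compare with a single streaming pass that records, in one dictionary, a 2-bit role flag per (k-1)-string (bit 1 = seen as a prefix, bit 2 = seen as a suffix) and returns whether every recorded string carries both bits; set equality of prefixes and suffixes is exactly 'union equals intersection', i.e. every flag is 3.
import Mathlib
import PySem

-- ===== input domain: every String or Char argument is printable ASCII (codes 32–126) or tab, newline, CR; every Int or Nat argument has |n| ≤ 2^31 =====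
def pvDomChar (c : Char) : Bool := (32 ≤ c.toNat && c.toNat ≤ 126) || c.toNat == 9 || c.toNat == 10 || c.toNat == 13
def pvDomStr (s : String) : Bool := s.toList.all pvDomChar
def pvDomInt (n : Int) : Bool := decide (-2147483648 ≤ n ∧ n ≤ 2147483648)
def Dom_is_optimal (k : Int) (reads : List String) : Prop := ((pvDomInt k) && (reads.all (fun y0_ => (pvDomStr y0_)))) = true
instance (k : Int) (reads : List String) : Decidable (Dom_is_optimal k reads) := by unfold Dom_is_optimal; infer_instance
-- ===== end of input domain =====

-- B replaces A's two-set build-and-compare with one dictionary of per-string role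
-- flags (1 = prefix, 2 = suffix) checked to all equal 3 (objective: alternative).

-- ===== PORT A =====
-- two-stage: build the set of kmers, then one loop over it adding kmer[:-1] / kmer[1:]
def is_optimal (k : Int) (reads : List String) : Bool :=
  let kmers : PySem.Set (List Char) :=
    reads.foldl (fun kmers read =>
      (PySem.List.pyRange 0 ((PySem.Str.len read : Int) - k + 1) 1).foldl
        (fun kmers i =>
          PySem.Set.add kmers (PySem.List.slice read.toList (some i) (some (i + k))))
        kmers)
      PySem.Set.empty
  -- one loop adds to both sets; iterating the set is safe: only set equality is returned
  let ps : PySem.Set (List Char) × PySem.Set (List Char) :=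
    kmers.foldl (fun ps kmer =>
      (PySem.Set.add ps.1 (PySem.List.slice kmer none (some (-1))),
       PySem.Set.add ps.2 (PySem.List.slice kmer (some 1) none)))
      (PySem.Set.empty, PySem.Set.empty)
  PySem.Set.equal ps.1 ps.2

-- ===== PORT B =====
-- one streaming pass filling a dict of role flags; iterating roles.values() is safe:
-- 'all' does not depend on the iteration order
def is_optimal_alt (k : Int) (reads : List String) : Bool :=
  let roles : PySem.Dict (List Char) Int :=
    reads.foldl (fun roles read =>
      (PySem.List.pyRange 0 ((PySem.Str.len read : Int) - k + 1) 1).foldl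
        (fun roles i =>
          let kmer := PySem.List.slice read.toList (some i) (some (i + k))
          let p := PySem.List.slice kmer none (some (-1))
          let s := PySem.List.slice kmer (some 1) none
          let roles := roles.insert p (PySem.Int.bor (roles.getD p 0) 1)
          roles.insert s (PySem.Int.bor (roles.getD s 0) 2))
        roles)
      PySem.Dict.empty
  (PySem.Dict.values roles).all (fun v => v == 3)

-- ===== PRECONDITION & SPEC =====
def Spec_is_optimal (k : Int) (reads : List String) (out : Bool) : Prop := out = is_optimal_alt k reads
instance (k : Int) (reads : List String) (out : Bool) : Decidable (Spec_is_optimal k reads out) := by unfold Spec_is_optimal; infer_instance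

-- ===== CLAIM (what is proved, stated in full; the proofs are below) =====
def Claim_equal_is_optimal : Prop := ∀ (k : Int) (reads : List String), Dom_is_optimal k reads → Spec_is_optimal k reads (is_optimal k reads)

-- ===== LEMMAS AND PROOFS =====

-- shorthands for the proof only (the ports spell their slices out)
def pvPre (m : List Char) : List Char := PySem.List.slice m none (some (-1))
def pvSuf (m : List Char) : List Char := PySem.List.slice m (some 1) none
def pvKmers (k : Int) (reads : List String) : List (List Char) :=
  reads.flatMap (fun read =>
    (PySem.List.pyRange 0 ((PySem.Str.len read : Int) - k + 1) 1).map
      (fun i => PySem.List.slice read.toList (some i) (some (i + k))))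
def pvEvents (k : Int) (reads : List String) : List (List Char × Int) :=
  (pvKmers k reads).flatMap (fun m => [(pvPre m, 1), (pvSuf m, 2)])
def pvStep (d : PySem.Dict (List Char) Int) (e : List Char × Int) : PySem.Dict (List Char) Int :=
  d.insert e.1 (PySem.Int.bor (d.getD e.1 0) e.2)

-- a nested 'for read: for i:' fold is the fold over the flattened list
theorem foldl_nested {α β γ : Type} (f : α → β → α) (g : γ → List β) (l : List γ) (init : α) :
    l.foldl (fun a c => (g c).foldl f a) init = (l.flatMap g).foldl f init := by
  induction l generalizing init with
  | nil => rfl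
  | cons c t ih => simp [List.foldl_append, ih]

theorem dict_getD (E : List (List Char × Int)) (h : ∀ e ∈ E, e.2 = 1 ∨ e.2 = 2) (x : List Char) :
    (E.foldl pvStep PySem.Dict.empty).getD x 0 =
      PySem.Int.bor (if (x, (1 : Int)) ∈ E then 1 else 0) (if (x, (2 : Int)) ∈ E then 2 else 0) := by
  revert h x
  induction E using List.reverseRecOn with
  | nil => intro x _; simp [PySem.Dict.getD_empty, PySem.Int.bor_zero]
  | append_singleton E e ih =>
    intro h x
    have hE : ∀ e' ∈ E, e'.2 = 1 ∨ e'.2 = 2 := fun e' he' => h e' (by simp [he'])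
    have he : e.2 = 1 ∨ e.2 = 2 := h e (by simp)
    rw [List.foldl_append]
    simp only [List.foldl_cons, List.foldl_nil]
    rw [show pvStep (E.foldl pvStep PySem.Dict.empty) e
          = (E.foldl pvStep PySem.Dict.empty).insert e.1
              (PySem.Int.bor ((E.foldl pvStep PySem.Dict.empty).getD e.1 0) e.2) from rfl,
        PySem.Dict.getD_insert, ih hE x, ih hE e.1]
    obtain ⟨y, b⟩ := e
    simp only at he
    by_cases hxy : x = y <;>
      rcases he with rfl | rfl <;>
      by_cases h1 : (x, (1 : Int)) ∈ E <;>
      by_cases h2 : (x, (2 : Int)) ∈ E <;>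
      simp_all [List.mem_append, Prod.ext_iff] <;> decide

theorem mem_event_iff (k : Int) (reads : List String) (x : List Char) (b : Int)
    (hb : b = 1 ∨ b = 2) :
    ((x, b) ∈ pvEvents k reads) ↔
      ∃ m ∈ pvKmers k reads, x = (if b = 1 then pvPre m else pvSuf m) := by
  unfold pvEvents
  rcases hb with rfl | rfl <;>
    simp [List.mem_flatMap, Prod.ext_iff, eq_comm]

theorem events_snd (k : Int) (reads : List String) :
    ∀ e ∈ pvEvents k reads, e.2 = 1 ∨ e.2 = 2 := by
  intro e he
  unfold pvEvents at he
  rw [List.mem_flatMap] at he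
  obtain ⟨m, _, hm⟩ := he
  simp only [List.mem_cons, List.not_mem_nil, or_false] at hm
  rcases hm with rfl | rfl
  · exact Or.inl rfl
  · exact Or.inr rfl

-- Bool predicates "x occurs as a kmer prefix / suffix"
def pvP1 (k : Int) (reads : List String) (x : List Char) : Bool :=
  (pvKmers k reads).any (fun m => x == pvPre m)
def pvP2 (k : Int) (reads : List String) (x : List Char) : Bool :=
  (pvKmers k reads).any (fun m => x == pvSuf m)

theorem pvP1_iff (k : Int) (reads : List String) (x : List Char) :
    pvP1 k reads x = true ↔ ∃ m ∈ pvKmers k reads, x = pvPre m := by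
  simp [pvP1]
theorem pvP2_iff (k : Int) (reads : List String) (x : List Char) :
    pvP2 k reads x = true ↔ ∃ m ∈ pvKmers k reads, x = pvSuf m := by
  simp [pvP2]

theorem getD_final (k : Int) (reads : List String) (x : List Char) :
    ((pvEvents k reads).foldl pvStep PySem.Dict.empty).getD x 0 =
      PySem.Int.bor (if pvP1 k reads x then 1 else 0) (if pvP2 k reads x then 2 else 0) := by
  rw [dict_getD _ (events_snd k reads) x]
  have h1 := mem_event_iff k reads x 1 (Or.inl rfl)
  have h2 := mem_event_iff k reads x 2 (Or.inr rfl)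
  norm_num at h1 h2
  rw [if_congr (h1.trans (pvP1_iff k reads x).symm) rfl rfl,
      if_congr (h2.trans (pvP2_iff k reads x).symm) rfl rfl]

-- A equals the set-equality of streamed prefix/suffix predicates
theorem is_optimal_eq (k : Int) (reads : List String) :
    is_optimal k reads = is_optimal_alt k reads := by
  -- normalise both programs to folds over pvKmers / pvEvents
  simp only [is_optimal, is_optimal_alt]
  rw [PySem.List.foldl_prod_mk
        (f := fun s kmer => PySem.Set.add s (PySem.List.slice kmer none (some (-1))))
        (g := fun s kmer => PySem.Set.add s (PySem.List.slice kmer (some 1) none))]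
  -- A's kmer set is Set.ofList (pvKmers k reads)
  have hA : (reads.foldl (fun kmers read =>
      (PySem.List.pyRange 0 ((PySem.Str.len read : Int) - k + 1) 1).foldl
        (fun kmers i =>
          PySem.Set.add kmers (PySem.List.slice read.toList (some i) (some (i + k))))
        kmers) PySem.Set.empty)
      = PySem.Set.ofList (pvKmers k reads) := by
    have : ∀ (read : String) (s : PySem.Set (List Char)),
        (PySem.List.pyRange 0 ((PySem.Str.len read : Int) - k + 1) 1).foldl
          (fun kmers i =>
            PySem.Set.add kmers (PySem.List.slice read.toList (some i) (some (i + k)))) s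
        = ((PySem.List.pyRange 0 ((PySem.Str.len read : Int) - k + 1) 1).map
            (fun i => PySem.List.slice read.toList (some i) (some (i + k)))).foldl
            PySem.Set.add s := by
      intro read s; rw [List.foldl_map]
    simp only [this]
    rw [foldl_nested PySem.Set.add _ reads PySem.Set.empty]
    rw [PySem.Set.ofList_eq_foldl]
    rfl
  rw [hA]
  -- B's dict is the pvStep fold over pvEvents
  have hB : (reads.foldl (fun roles read =>
      (PySem.List.pyRange 0 ((PySem.Str.len read : Int) - k + 1) 1).foldl
        (fun roles i =>
          let kmer := PySem.List.slice read.toList (some i) (some (i + k))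
          let p := PySem.List.slice kmer none (some (-1))
          let s := PySem.List.slice kmer (some 1) none
          let roles := roles.insert p (PySem.Int.bor (roles.getD p 0) 1)
          roles.insert s (PySem.Int.bor (roles.getD s 0) 2))
        roles) PySem.Dict.empty)
      = (pvEvents k reads).foldl pvStep PySem.Dict.empty := by
    have hstep : ∀ (read : String) (d : PySem.Dict (List Char) Int),
        (PySem.List.pyRange 0 ((PySem.Str.len read : Int) - k + 1) 1).foldl
          (fun roles i =>
            let kmer := PySem.List.slice read.toList (some i) (some (i + k))
            let p := PySem.List.slice kmer none (some (-1))
            let s := PySem.List.slice kmer (some 1) none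
            let roles := roles.insert p (PySem.Int.bor (roles.getD p 0) 1)
            roles.insert s (PySem.Int.bor (roles.getD s 0) 2)) d
        = ((PySem.List.pyRange 0 ((PySem.Str.len read : Int) - k + 1) 1).map
            (fun i => PySem.List.slice read.toList (some i) (some (i + k)))).foldl
            (fun d m => ((fun m => [(pvPre m, (1 : Int)), (pvSuf m, (2 : Int))]) m).foldl pvStep d) d := by
      intro read d; rw [List.foldl_map]; rfl
    simp only [hstep]
    rw [foldl_nested _ _ reads PySem.Dict.empty,
        foldl_nested pvStep (fun m => [(pvPre m, (1 : Int)), (pvSuf m, (2 : Int))]) _ PySem.Dict.empty]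
    rfl
  rw [hB]
  -- B's check: every key's flag is 3
  have hnodup : ((pvEvents k reads).foldl pvStep PySem.Dict.empty).keys.Nodup :=
    PySem.Dict.nodup_keys_foldl_insert_key (pvEvents k reads) Prod.fst
      (fun d e => PySem.Int.bor (d.getD e.1 0) e.2) PySem.Dict.empty
      (by rw [PySem.Dict.keys_empty]; exact List.nodup_nil)
  rw [PySem.Dict.values_eq_map_keys _ hnodup 0]
  have hkeys : ((pvEvents k reads).foldl pvStep PySem.Dict.empty).keys
      = PySem.Set.ofList ((pvEvents k reads).map Prod.fst) := by
    rw [show ((pvEvents k reads).foldl pvStep PySem.Dict.empty)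
          = ((pvEvents k reads).foldl
              (fun d e => d.insert e.1 (PySem.Int.bor (d.getD e.1 0) e.2)) PySem.Dict.empty) from rfl,
        PySem.Dict.keys_foldl_insert_key, PySem.Dict.keys_empty]
    rfl
  rw [Bool.eq_iff_iff]
  simp only [PySem.Set.equal_iff, List.all_eq_true, List.mem_map, beq_iff_eq]
  -- membership in the streamed prefix/suffix sets
  have hmemP : ∀ x, (x ∈ (PySem.Set.ofList (pvKmers k reads)).foldl
      (fun s kmer => PySem.Set.add s (PySem.List.slice kmer none (some (-1)))) PySem.Set.empty)
      ↔ pvP1 k reads x := by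
    intro x
    rw [PySem.Set.mem_foldl_add, pvP1_iff]
    unfold pvPre
    simp [PySem.Set.mem_ofList, PySem.Set.empty]
  have hmemS : ∀ x, (x ∈ (PySem.Set.ofList (pvKmers k reads)).foldl
      (fun s kmer => PySem.Set.add s (PySem.List.slice kmer (some 1) none)) PySem.Set.empty)
      ↔ pvP2 k reads x := by
    intro x
    rw [PySem.Set.mem_foldl_add, pvP2_iff]
    unfold pvSuf
    simp [PySem.Set.mem_ofList, PySem.Set.empty]
  have hkeymem : ∀ x, x ∈ ((pvEvents k reads).foldl pvStep PySem.Dict.empty).keys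
      ↔ (pvP1 k reads x ∨ pvP2 k reads x) := by
    intro x
    rw [hkeys, PySem.Set.mem_ofList, List.mem_map, pvP1_iff, pvP2_iff]
    constructor
    · rintro ⟨e, he, rfl⟩
      rw [pvEvents, List.mem_flatMap] at he
      obtain ⟨m, hm, he⟩ := he
      simp only [List.mem_cons, List.not_mem_nil, or_false] at he
      rcases he with rfl | rfl
      · exact Or.inl ⟨m, hm, rfl⟩
      · exact Or.inr ⟨m, hm, rfl⟩
    · rintro (⟨m, hm, rfl⟩ | ⟨m, hm, rfl⟩)
      · exact ⟨(pvPre m, 1), by rw [pvEvents, List.mem_flatMap]; exact ⟨m, hm, by simp⟩, rfl⟩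
      · exact ⟨(pvSuf m, 2), by rw [pvEvents, List.mem_flatMap]; exact ⟨m, hm, by simp⟩, rfl⟩
  constructor
  · intro hiff v hv
    obtain ⟨x, hx, rfl⟩ := hv
    have hx' := (hkeymem x).1 hx
    have hp1 : pvP1 k reads x = true := by
      rcases hx' with h | h
      · exact h
      · exact ((hmemP x).1 ((hiff x).2 ((hmemS x).2 h)))
    have hp2 : pvP2 k reads x = true := by
      rcases hx' with h | h
      · exact ((hmemS x).1 ((hiff x).1 ((hmemP x).2 h)))
      · exact h
    rw [getD_final, if_pos hp1, if_pos hp2]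
    decide
  · intro hall x
    rw [hmemP x, hmemS x]
    constructor
    · intro hp1
      have := hall _ ⟨x, (hkeymem x).2 (Or.inl hp1), rfl⟩
      rw [getD_final, if_pos hp1] at this
      by_contra hp2
      rw [if_neg hp2] at this
      exact absurd this (by decide)
    · intro hp2
      have := hall _ ⟨x, (hkeymem x).2 (Or.inr hp2), rfl⟩
      rw [getD_final, if_pos hp2] at this
      by_contra hp1
      rw [if_neg hp1] at this
      exact absurd this (by decide)

-- ===== VERDICT (by name: the statement is the Claim_ definition above) =====
theorem is_optimal_spec : Claim_equal_is_optimal := by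
  intro k reads _
  unfold Spec_is_optimal
  exact is_optimal_eq k reads
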